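-- pv_equiv track=rewrite | github.com/JuanBernaal/universidad | II Semester/Estructura de datos/tarea1.py | sumarValoresMat
-- ===== SOURCE A (Python) =====
-- def encontrarValor(lista, num):
--     for i in range(len(lista)):
--         if lista[i][0] == num:
--             return lista[i][1]
--
-- def sumarValoresMat(disp, lista):
--     ans = 0
--     for i in lista:
--         if i[0] in disp:
--             lista1 = disp[i[0]]
--             x = encontrarValor(lista1, i[1])
--             if x != None:
--                 ans += x
--     return ans
-- ===== SOURCE B (Python) =====
-- def sumarValoresMat(disp, lista):
--     # Flatten disp once into a dict keyed by (outer_key, inner_key), first occurrence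
--     # wins; records too short to form a key-value pair are ignored. Then one flat
--     # lookup per element of lista.
--     index = {}
--     for k, sub in disp.items():
--         for e in sub:
--             if len(e) >= 2:
--                 index.setdefault((k, e[0]), e[1])
--     ans = 0
--     for i in lista:
--         if len(i) >= 2:
--             v = index.get((i[0], i[1]))
--             if v is not None:
--                 ans += v
--     return ans
-- ===== Notes on version B (the rewrite author's own statement) =====
-- stated objective: idiomatic
-- what changed: B flattens disp once into a single dict keyed by (outer_key, inner_key) with first-occurrence-wins (ignoring records shorter than a pair), then does one flat dict lookup per element of lista, removing the helper and its inner linear scan.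
-- outside the precondition, e.g. on sumarValoresMat({1: [[2, 10], []]}, [[1, 2]]): A returns 10, B returns 10; on sumarValoresMat({1: [[2, 10], [2]]}, [[1, 2]]): A returns 10, B returns 10
import Mathlib
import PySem

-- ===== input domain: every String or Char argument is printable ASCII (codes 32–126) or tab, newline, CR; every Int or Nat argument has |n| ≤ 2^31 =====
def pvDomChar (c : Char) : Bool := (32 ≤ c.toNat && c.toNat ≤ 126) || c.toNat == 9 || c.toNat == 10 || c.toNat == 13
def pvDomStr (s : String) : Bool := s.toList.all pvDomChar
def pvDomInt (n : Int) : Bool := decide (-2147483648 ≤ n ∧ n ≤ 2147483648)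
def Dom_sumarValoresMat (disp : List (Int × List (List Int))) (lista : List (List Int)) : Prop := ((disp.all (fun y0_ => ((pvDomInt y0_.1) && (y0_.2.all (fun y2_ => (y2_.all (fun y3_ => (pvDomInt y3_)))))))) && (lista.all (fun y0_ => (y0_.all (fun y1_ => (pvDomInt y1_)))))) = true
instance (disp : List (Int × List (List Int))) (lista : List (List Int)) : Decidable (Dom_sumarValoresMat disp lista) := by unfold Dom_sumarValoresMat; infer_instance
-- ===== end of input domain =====

-- B flattens disp once into one dict keyed by (outer_key, inner_key) (first occurrence
-- wins, records shorter than a pair ignored) and then does a single flat lookup per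
-- pair of lista (objective: idiomatic).

-- ===== PORT A =====
def encontrarValor (lista : List (List Int)) (num : Int) : Option Int :=
  match lista with
  | [] => none
  | e :: rest =>
    match PySem.List.pyGet? e 0 with
    | none => none      -- Python: IndexError on lista[i][0]; excluded by Pre_
    | some h => if h = num then PySem.List.pyGet? e 1 else encontrarValor rest num

def sumarValoresMat (disp : List (Int × List (List Int))) (lista : List (List Int)) : Int :=
  lista.foldl (fun ans i =>
    match PySem.List.pyGet? i 0 with
    | none => ans       -- Python: IndexError on i[0]; excluded by Pre_
    | some k =>
      match (PySem.Dict.mk disp).get? k with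
      | none => ans
      | some lista1 =>
        match PySem.List.pyGet? i 1 with
        | none => ans   -- Python: IndexError on i[1]; excluded by Pre_
        | some n =>
          match encontrarValor lista1 n with
          | none => ans
          | some x => ans + x) 0

-- ===== PORT B =====
def flatIndex (disp : List (Int × List (List Int))) : PySem.Dict (Int × Int) Int :=
  disp.foldl (fun idx p =>
    p.2.foldl (fun idx e =>
      if 2 ≤ e.length then
        match PySem.List.pyGet? e 0, PySem.List.pyGet? e 1 with
        | some a, some b => idx.setdefault (p.1, a) b
        | _, _ => idx    -- unreachable under the length guard
      else idx) idx) PySem.Dict.empty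

def sumarValoresMat_alt (disp : List (Int × List (List Int))) (lista : List (List Int)) : Int :=
  let idx := flatIndex disp
  lista.foldl (fun ans i =>
    if 2 ≤ i.length then
      match PySem.List.pyGet? i 0, PySem.List.pyGet? i 1 with
      | some a, some b =>
        match idx.get? (a, b) with
        | some v => ans + v
        | none => ans
      | _, _ => ans      -- unreachable under the length guard
    else ans) 0

-- ===== PRECONDITION & SPEC =====
-- Pre_ excludes (a) assoc lists with duplicate outer keys, which no Python dict input
-- can produce, and (b) inputs where a lista entry is empty, or references a disp key
-- with fewer than 2 elements, or references a sublist containing an empty record or a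
-- record matching the looked-up key that is too short to carry a value: on the scanned
-- part of such sublists A raises IndexError, and whether a record is scanned depends on
-- A's early exit at the first match. B ignores such malformed records.
def Pre_sumarValoresMat (disp : List (Int × List (List Int))) (lista : List (List Int)) : Prop :=
  (disp.map Prod.fst).Nodup ∧
  ∀ i ∈ lista, i ≠ [] ∧ ∀ p ∈ disp, p.1 = i.headI →
    2 ≤ i.length ∧ ∀ e ∈ p.2, e ≠ [] ∧ (e.headI = i.getD 1 0 → 2 ≤ e.length)
instance (disp : List (Int × List (List Int))) (lista : List (List Int)) : Decidable (Pre_sumarValoresMat disp lista) := by unfold Pre_sumarValoresMat; infer_instance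

def pvWitness_sumarValoresMat : (List (Int × List (List Int))) × List (List Int) :=
  ([(1, [[2, 10], [3, 20]]), (2, [[3, 7]])], [[1, 3], [2, 3], [2, 9], [5, 1]])

def Spec_sumarValoresMat (disp : List (Int × List (List Int))) (lista : List (List Int)) (out : Int) : Prop := out = sumarValoresMat_alt disp lista
instance (disp : List (Int × List (List Int))) (lista : List (List Int)) (out : Int) : Decidable (Spec_sumarValoresMat disp lista out) := by unfold Spec_sumarValoresMat; infer_instance

-- ===== CLAIM (what is proved, stated in full; the proofs are below) =====
def Claim_equal_sumarValoresMat : Prop := ∀ (disp : List (Int × List (List Int))) (lista : List (List Int)), Dom_sumarValoresMat disp lista → Pre_sumarValoresMat disp lista → Spec_sumarValoresMat disp lista (sumarValoresMat disp lista)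

-- ===== LEMMAS AND PROOFS =====

-- Specification of a lookup in the flattened index, as a direct recursion over disp.
def lookIn (k : Int) (sub : List (List Int)) (q : Int × Int) : Option Int :=
  match sub with
  | [] => none
  | e :: rest =>
    if 2 ≤ e.length then
      match PySem.List.pyGet? e 0, PySem.List.pyGet? e 1 with
      | some a, some b => if ((k, a) : Int × Int) = q then some b else lookIn k rest q
      | _, _ => lookIn k rest q
    else lookIn k rest q

def lookAll (disp : List (Int × List (List Int))) (q : Int × Int) : Option Int :=
  match disp with
  | [] => none
  | p :: rest => (lookIn p.1 p.2 q).orElse (fun _ => lookAll rest q)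

lemma foldl_inner_get? (k : Int) (sub : List (List Int)) (idx : PySem.Dict (Int × Int) Int)
    (q : Int × Int) :
    ((sub.foldl (fun idx e =>
      if 2 ≤ e.length then
        match PySem.List.pyGet? e 0, PySem.List.pyGet? e 1 with
        | some a, some b => idx.setdefault (k, a) b
        | _, _ => idx
      else idx) idx).get? q)
      = (idx.get? q).orElse (fun _ => lookIn k sub q) := by
  induction sub generalizing idx with
  | nil => cases h : idx.get? q <;> simp [lookIn, Option.orElse, h]
  | cons e rest ih =>
    simp only [List.foldl_cons, lookIn]
    by_cases hlen : 2 ≤ e.length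
    · simp only [if_pos hlen]
      cases h0 : PySem.List.pyGet? e 0 with
      | none => rw [ih]
      | some a =>
        cases h1 : PySem.List.pyGet? e 1 with
        | none => rw [ih]
        | some b =>
          rw [ih]
          dsimp only
          by_cases hc : idx.contains (k, a)
          · rw [PySem.Dict.setdefault_of_contains _ _ hc]
            cases hq : idx.get? q with
            | some v => simp [Option.orElse]
            | none =>
              by_cases he : ((k, a) : Int × Int) = q
              · subst he
                rw [PySem.Dict.contains_eq_isSome_get?] at hc
                simp [hq] at hc
              · simp [Option.orElse, he]
          · rw [PySem.Dict.setdefault_of_not_contains _ _ (by simpa using hc)]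
            rw [PySem.Dict.get?_insert]
            by_cases he : q = ((k, a) : Int × Int)
            · subst he
              have hq : idx.get? (k, a) = none := by
                rw [PySem.Dict.contains_eq_isSome_get?] at hc
                cases hqq : idx.get? (k, a) <;> simp [hqq] at hc ⊢
              simp [Option.orElse, hq]
            · have he' : ¬ ((k, a) : Int × Int) = q := fun h => he h.symm
              simp [Option.orElse, he, he']
    · simp only [if_neg hlen]
      rw [ih]

lemma flatIndex_get? (disp : List (Int × List (List Int))) (q : Int × Int) :
    (flatIndex disp).get? q = lookAll disp q := by
  suffices h : ∀ (idx : PySem.Dict (Int × Int) Int),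
      ((disp.foldl (fun idx p =>
        p.2.foldl (fun idx e =>
          if 2 ≤ e.length then
            match PySem.List.pyGet? e 0, PySem.List.pyGet? e 1 with
            | some a, some b => idx.setdefault (p.1, a) b
            | _, _ => idx
          else idx) idx) idx).get? q)
        = (idx.get? q).orElse (fun _ => lookAll disp q) by
    have := h PySem.Dict.empty
    simpa [flatIndex, PySem.Dict.get?_empty, Option.orElse] using this
  induction disp with
  | nil => intro idx; cases h : idx.get? q <;> simp [lookAll, Option.orElse, h]
  | cons p rest ih =>
    intro idx
    simp only [List.foldl_cons, lookAll]
    rw [ih, foldl_inner_get? p.1 p.2 idx q]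
    cases idx.get? q <;> cases lookIn p.1 p.2 q <;>
      simp [Option.orElse]

lemma lookIn_ne (k : Int) (sub : List (List Int)) (a b : Int) (h : k ≠ a) :
    lookIn k sub (a, b) = none := by
  induction sub with
  | nil => rfl
  | cons e rest ih =>
    simp only [lookIn]
    by_cases hlen : 2 ≤ e.length
    · simp only [if_pos hlen]
      cases h0 : PySem.List.pyGet? e 0 with
      | none => exact ih
      | some x =>
        cases h1 : PySem.List.pyGet? e 1 with
        | none => exact ih
        | some y =>
          have : ¬ ((k, x) : Int × Int) = (a, b) := by
            intro hc; exact h (congrArg Prod.fst hc)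
          simp [this, ih]
    · simp only [if_neg hlen]; exact ih

lemma lookAll_not_mem (disp : List (Int × List (List Int))) (a b : Int)
    (h : a ∉ disp.map Prod.fst) : lookAll disp (a, b) = none := by
  induction disp with
  | nil => rfl
  | cons p rest ih =>
    simp only [List.map_cons, List.mem_cons, not_or] at h
    simp only [lookAll]
    rw [lookIn_ne p.1 p.2 a b (fun hc => h.1 hc.symm), ih h.2]
    rfl

-- First-match assoc lookup in disp, under nodup keys, seen through lookAll.
lemma lookAll_eq (disp : List (Int × List (List Int))) (a b : Int)
    (hnd : (disp.map Prod.fst).Nodup) :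
    lookAll disp (a, b)
      = match (PySem.Dict.mk disp).get? a with
        | none => none
        | some sub => lookIn a sub (a, b) := by
  induction disp with
  | nil => simp [lookAll, PySem.Dict.get?]
  | cons p rest ih =>
    simp only [List.map_cons, List.nodup_cons] at hnd
    simp only [lookAll]
    rw [PySem.Dict.get?_mk_cons]
    by_cases he : p.1 = a
    · subst he
      have hr : lookAll rest (p.1, b) = none :=
        lookAll_not_mem rest p.1 b hnd.1
      simp only [beq_self_eq_true, if_pos]
      cases lookIn p.1 p.2 (p.1, b) <;> simp [Option.orElse, hr]
    · have : (p.1 == a) = false := by simp [he]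
      rw [this]
      simp only [if_neg Bool.false_ne_true]
      rw [lookIn_ne p.1 p.2 a b he, ih hnd.2]
      rfl

-- On a sublist whose records are nonempty and whose records matching b are pairs,
-- lookIn at (a, b) is A's helper scan for b.
lemma lookIn_eq_encontrarValor (a : Int) (sub : List (List Int)) (b : Int)
    (hw : ∀ e ∈ sub, e ≠ [] ∧ (e.headI = b → 2 ≤ e.length)) :
    lookIn a sub (a, b) = encontrarValor sub b := by
  induction sub with
  | nil => rfl
  | cons e rest ih =>
    have hrest : ∀ e ∈ rest, e ≠ [] ∧ (e.headI = b → 2 ≤ e.length) :=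
      fun e' h' => hw e' (by simp [h'])
    obtain ⟨x, t, rfl⟩ : ∃ x t, e = x :: t := by
      rcases hw e (by simp) with ⟨hne, -⟩
      match e with
      | x :: t => exact ⟨x, t, rfl⟩
    have h0 : PySem.List.pyGet? (x :: t) 0 = some x := by
      simp
    by_cases hx : x = b
    · subst hx
      obtain ⟨y, t', rfl⟩ : ∃ y t', t = y :: t' := by
        have := (hw (x :: t) (by simp)).2 (by simp)
        match t with
        | y :: t' => exact ⟨y, t', rfl⟩
      have h1 : PySem.List.pyGet? (x :: y :: t') 1 = some y := by
        have : ((1 : Int)) = ((1 : Nat) : Int) := by norm_num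
        rw [this, PySem.List.pyGet?_natCast]; rfl
      simp [lookIn, encontrarValor, h0]
    · simp only [lookIn, encontrarValor, h0]
      by_cases hlen : 2 ≤ (x :: t).length
      · obtain ⟨y, t', rfl⟩ : ∃ y t', t = y :: t' := by
          match t, hlen with
          | y :: t', _ => exact ⟨y, t', rfl⟩
        have h1 : PySem.List.pyGet? (x :: y :: t') 1 = some y := by
          have : ((1 : Int)) = ((1 : Nat) : Int) := by norm_num
          rw [this, PySem.List.pyGet?_natCast]; rfl
        simp [hx, Prod.ext_iff, ih hrest]
      · have ht : t = [] := by
          cases t with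
          | nil => rfl
          | cons z t'' => exact absurd (by simp) hlen
        subst ht
        have h1 : PySem.List.pyGet? [x] (1 : Int) = none := by
          simp [PySem.List.pyGet?_eq_none_iff, PySem.Raise.InRange]
        simp [hx, ih hrest]

-- ===== VERDICT (by name: the statement is the Claim_ definition above) =====
theorem sumarValoresMat_spec : Claim_equal_sumarValoresMat := by
  intro disp lista _ hpre
  obtain ⟨hnd, hlista⟩ := hpre
  unfold Spec_sumarValoresMat sumarValoresMat sumarValoresMat_alt
  apply PySem.List.foldl_congr_mem
  intro ans i hi
  obtain ⟨hne, hkey⟩ := hlista i hi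
  obtain ⟨x, t, rfl⟩ : ∃ x t, i = x :: t := by
    match i with
    | x :: t => exact ⟨x, t, rfl⟩
  have h0 : PySem.List.pyGet? (x :: t) 0 = some x := by
    simp
  cases t with
  | nil =>
    -- i = [x]: B's length guard skips; A must find no key x (else Pre_ forces 2 ≤ 1)
    have hlen : ¬ 2 ≤ ([x] : List Int).length := by simp
    cases hd : (PySem.Dict.mk disp).get? x with
    | none => simp [hd]
    | some sub =>
      have hmem : (x, sub) ∈ disp := by
        have := PySem.Dict.mem_items_of_get?_eq_some (PySem.Dict.mk disp) hd
        simpa [PySem.Dict.items] using this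
      have := (hkey (x, sub) hmem rfl).1
      simp at this
  | cons y t' =>
    have hlen : 2 ≤ (x :: y :: t' : List Int).length := by simp
    have h1 : PySem.List.pyGet? (x :: y :: t') 1 = some y := by
      have : ((1 : Int)) = ((1 : Nat) : Int) := by norm_num
      rw [this, PySem.List.pyGet?_natCast]; rfl
    simp only [h0, h1, if_pos hlen]
    rw [flatIndex_get?, lookAll_eq disp x y hnd]
    cases hd : (PySem.Dict.mk disp).get? x with
    | none => rfl
    | some sub =>
      have hmem : (x, sub) ∈ disp := by
        have := PySem.Dict.mem_items_of_get?_eq_some (PySem.Dict.mk disp) hd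
        simpa [PySem.Dict.items] using this
      have hsub := (hkey (x, sub) hmem rfl).2
      have hy : (x :: y :: t' : List Int).getD 1 0 = y := rfl
      rw [hy] at hsub
      have hlook : lookIn x sub (x, y) = encontrarValor sub y :=
        lookIn_eq_encontrarValor x sub y hsub
      dsimp only
      rw [hlook]
      cases encontrarValor sub y <;> rfl
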